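-- pv_equiv track=rewrite | github.com/Gerry-from-ositech/openwrt-sbom | dump_components_to_csv.py | find_kernel_cpe
-- ===== SOURCE A (Python) =====
-- def find_kernel_cpe(components: list[dict]) -> tuple[str, str | None]:
--     """
--     Find the Linux kernel CPE and version from components.
--
--     Returns: (cpe, version) tuple
--     """
--     # Look for explicit linux_kernel CPE
--     for comp in components:
--         cpe = comp.get("cpe", "")
--         if "linux_kernel" in cpe.lower():
--             return cpe, comp.get("version")
--
--     # Look for component named "kernel" and extract its version
--     for comp in components:
--         name = comp.get("name", "")
--         if name == "kernel":
--             version = comp.get("version", "")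
--             # Extract kernel version (e.g., "5.4.213-1-..." -> "5.4.213")
--             if version:
--                 base_version = version.split("-")[0]
--                 cpe = f"cpe:2.3:o:linux:linux_kernel:{base_version}:*:*:*:*:*:*:*"
--                 return cpe, version
--
--     return None, None
-- ===== SOURCE B (Python) =====
-- def find_kernel_cpe(components: list[dict]) -> tuple[str, str | None]:
--     """Single pass: return immediately on a linux_kernel CPE hit; remember the
--     first 'kernel'-named component with a truthy version as a fallback."""
--     fallback = None
--     for comp in components:
--         cpe = comp.get("cpe", "")
--         if "linux_kernel" in cpe.lower():
--             return cpe, comp.get("version")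
--         if fallback is None and comp.get("name", "") == "kernel":
--             version = comp.get("version", "")
--             if version:
--                 base_version = version.split("-")[0]
--                 fallback = (f"cpe:2.3:o:linux:linux_kernel:{base_version}:*:*:*:*:*:*:*", version)
--     return fallback if fallback is not None else (None, None)
-- ===== Notes on version B (the rewrite author's own statement) =====
-- stated objective: alternative
-- what changed: Two sequential scans (CPE scan, then kernel-name scan) are merged into one loop that returns on a CPE hit and keeps the first kernel-name match in a fallback variable.
import Mathlib
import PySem

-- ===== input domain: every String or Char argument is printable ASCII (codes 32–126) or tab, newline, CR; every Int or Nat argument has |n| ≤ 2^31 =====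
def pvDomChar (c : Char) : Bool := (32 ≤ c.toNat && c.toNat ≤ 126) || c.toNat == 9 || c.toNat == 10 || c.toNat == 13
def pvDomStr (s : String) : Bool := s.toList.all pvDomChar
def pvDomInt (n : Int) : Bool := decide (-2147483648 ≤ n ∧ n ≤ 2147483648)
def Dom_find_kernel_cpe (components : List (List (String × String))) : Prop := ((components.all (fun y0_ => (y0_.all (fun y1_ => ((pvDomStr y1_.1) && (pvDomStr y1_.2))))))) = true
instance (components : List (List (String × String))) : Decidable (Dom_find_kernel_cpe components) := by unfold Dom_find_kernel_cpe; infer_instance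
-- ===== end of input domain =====

-- B merges A's two sequential scans into a single loop with a fallback variable (alternative decomposition, same cost).
-- ===== PORT A =====
-- first loop of A: look for an explicit linux_kernel CPE
def findCpeLoop1 : List (List (String × String)) → Option (String × Option String)
  | [] => none
  | comp :: rest =>
    let cpe := PySem.Dict.getD (PySem.Dict.mk comp) "cpe" ""
    if PySem.Str.isIn "linux_kernel" (PySem.Str.lower cpe) then
      some (cpe, PySem.Dict.get? (PySem.Dict.mk comp) "version")
    else findCpeLoop1 rest

-- second loop of A: component named "kernel" with a truthy version
-- (version.split("-") is never empty, so [0] is headD "")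
def findCpeLoop2 : List (List (String × String)) → Option (String × String)
  | [] => none
  | comp :: rest =>
    if PySem.Dict.getD (PySem.Dict.mk comp) "name" "" == "kernel" then
      let version := PySem.Dict.getD (PySem.Dict.mk comp) "version" ""
      if version ≠ "" then
        some ("cpe:2.3:o:linux:linux_kernel:" ++ (((PySem.Str.split? version "-").getD []).headD "") ++ ":*:*:*:*:*:*:*", version)
      else findCpeLoop2 rest
    else findCpeLoop2 rest

def find_kernel_cpe (components : List (List (String × String))) : Option String × Option String :=
  match findCpeLoop1 components with
  | some (cpe, v) => (some cpe, v)
  | none =>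
    match findCpeLoop2 components with
    | some (cpe, v) => (some cpe, some v)
    | none => (none, none)

-- ===== PORT B =====
-- single loop carrying the fallback accumulator (Source B's for-loop)
def findCpeGo : List (List (String × String)) → Option (String × String) → Option String × Option String
  | [], fb =>
    match fb with
    | some (cpe, v) => (some cpe, some v)
    | none => (none, none)
  | comp :: rest, fb =>
    let cpe := PySem.Dict.getD (PySem.Dict.mk comp) "cpe" ""
    if PySem.Str.isIn "linux_kernel" (PySem.Str.lower cpe) then
      (some cpe, PySem.Dict.get? (PySem.Dict.mk comp) "version")
    else if fb.isNone && (PySem.Dict.getD (PySem.Dict.mk comp) "name" "" == "kernel") then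
      let version := PySem.Dict.getD (PySem.Dict.mk comp) "version" ""
      if version ≠ "" then
        findCpeGo rest (some ("cpe:2.3:o:linux:linux_kernel:" ++ (((PySem.Str.split? version "-").getD []).headD "") ++ ":*:*:*:*:*:*:*", version))
      else findCpeGo rest fb
    else findCpeGo rest fb

def find_kernel_cpe_alt (components : List (List (String × String))) : Option String × Option String :=
  findCpeGo components none

-- ===== PRECONDITION & SPEC =====
def Spec_find_kernel_cpe (components : List (List (String × String))) (out : Option String × Option String) : Prop := out = find_kernel_cpe_alt components
instance (components : List (List (String × String))) (out : Option String × Option String) : Decidable (Spec_find_kernel_cpe components out) := by unfold Spec_find_kernel_cpe; infer_instance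

-- ===== CLAIM (what is proved, stated in full; the proofs are below) =====
def Claim_equal_find_kernel_cpe : Prop := ∀ (components : List (List (String × String))), Dom_find_kernel_cpe components → Spec_find_kernel_cpe components (find_kernel_cpe components)

-- ===== LEMMAS AND PROOFS =====

-- invariant of B's loop: it is A's first scan, then the fallback, then A's second scan
theorem findCpeGo_eq (comps : List (List (String × String))) (fb : Option (String × String)) :
    findCpeGo comps fb =
      match findCpeLoop1 comps with
      | some (cpe, v) => (some cpe, v)
      | none =>
        match fb with
        | some (cpe, v) => (some cpe, some v)
        | none =>
          match findCpeLoop2 comps with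
          | some (cpe, v) => (some cpe, some v)
          | none => (none, none) := by
  induction comps generalizing fb with
  | nil => cases fb <;> simp [findCpeGo, findCpeLoop1, findCpeLoop2]
  | cons comp rest ih =>
    by_cases h1 : PySem.Str.isIn "linux_kernel" (PySem.Str.lower (PySem.Dict.getD (PySem.Dict.mk comp) "cpe" "")) = true
    · simp at h1; simp [findCpeGo, findCpeLoop1, h1]
    · simp at h1
      by_cases h2 : PySem.Dict.getD (PySem.Dict.mk comp) "name" "" = "kernel"
      · by_cases h3 : PySem.Dict.getD (PySem.Dict.mk comp) "version" "" = ""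
        · rcases fb with _ | p <;>
            simp [findCpeGo, findCpeLoop1, findCpeLoop2, h1, h2, h3, ih]
        · rcases fb with _ | p <;>
            simp [findCpeGo, findCpeLoop1, findCpeLoop2, h1, h2, h3, ih]
      · rcases fb with _ | p <;>
          simp [findCpeGo, findCpeLoop1, findCpeLoop2, h1, h2, ih]

-- ===== VERDICT (by name: the statement is the Claim_ definition above) =====
theorem find_kernel_cpe_spec : Claim_equal_find_kernel_cpe := by
  intro components _
  unfold Spec_find_kernel_cpe find_kernel_cpe find_kernel_cpe_alt
  rw [findCpeGo_eq]
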